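-- pv_equiv track=rewrite | github.com/Danielfoojunwei/SwarmBrain-Swarm-Imitation-Learning-Orchestration-Architecture | orchestrator/coordination/standardized_roles.py | assign_multi_actor_roles
-- ===== SOURCE A (Python) =====
-- from enum import Enum
-- from typing import Any, Dict, List, Optional
--
-- class RoleType(str, Enum):
--     """
--     Standardized role types across SwarmBrain, SwarmBridge, and Dynamical
--
--     These roles are compatible with:
--     - SwarmBridge Multi-Actor CSA roles
--     - Dynamical skill execution contexts
--     - Industrial task assignments
--     """
--     # Multi-actor roles (from SwarmBridge)
--     LEADER = "leader"  # Coordinates multi-actor task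
--     FOLLOWER = "follower"  # Follows leader's coordination
--     SUPPORT = "support"  # Provides physical support/stability
--     SPOTTER = "spotter"  # Monitors without direct interaction
--     MONITOR = "monitor"  # Perception-only observation
--
--     # Single-actor roles (from Dynamical)
--     EXECUTOR = "executor"  # Executes individual skill
--     OPERATOR = "operator"  # Operator-guided execution
--
--     # Industrial roles
--     PICKER = "picker"  # Pick items
--     PLACER = "placer"  # Place items
--     TRANSPORTER = "transporter"  # Transport items
--     INSPECTOR = "inspector"  # Quality inspection
--     ASSEMBLER = "assembler"  # Assembly tasks
--
--     # Generic
--     CUSTOM = "custom"  # User-defined role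
--
-- def assign_multi_actor_roles(
--     task_type: str,
--     num_robots: int,
-- ) -> List[RoleType]:
--     """
--     Assign roles for multi-actor task
--
--     Args:
--         task_type: Type of multi-actor task
--         num_robots: Number of robots needed
--
--     Returns:
--         List of assigned roles
--     """
--     if task_type == "cooperative_lift":
--         if num_robots == 2:
--             return [RoleType.LEADER, RoleType.FOLLOWER]
--         elif num_robots == 3:
--             return [RoleType.LEADER, RoleType.SUPPORT, RoleType.MONITOR]
--
--     elif task_type == "assembly":
--         if num_robots == 2:
--             return [RoleType.ASSEMBLER, RoleType.SUPPORT]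
--         elif num_robots == 3:
--             return [RoleType.LEADER, RoleType.ASSEMBLER, RoleType.INSPECTOR]
--
--     elif task_type == "transport":
--         if num_robots == 2:
--             return [RoleType.PICKER, RoleType.PLACER]
--         elif num_robots >= 3:
--             return [RoleType.PICKER] + [RoleType.TRANSPORTER] * (num_robots - 2) + [RoleType.PLACER]
--
--     # Default: balanced roles
--     roles = [RoleType.LEADER]
--     for _ in range(num_robots - 1):
--         roles.append(RoleType.FOLLOWER)
--     return roles
-- ===== SOURCE B (Python) =====
-- from enum import Enum
--
-- class RoleType(str, Enum):
--     LEADER = "leader"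
--     FOLLOWER = "follower"
--     SUPPORT = "support"
--     SPOTTER = "spotter"
--     MONITOR = "monitor"
--     EXECUTOR = "executor"
--     OPERATOR = "operator"
--     PICKER = "picker"
--     PLACER = "placer"
--     TRANSPORTER = "transporter"
--     INSPECTOR = "inspector"
--     ASSEMBLER = "assembler"
--     CUSTOM = "custom"
--
-- def _role_at(task_type, n, i):
--     """Role of the robot at position i in a crew of n for this task."""
--     if task_type == "transport" and n >= 2:
--         if i == 0:
--             return RoleType.PICKER
--         if i == n - 1:
--             return RoleType.PLACER
--         return RoleType.TRANSPORTER
--     if task_type == "cooperative_lift" and n == 3: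
--         return RoleType.LEADER if i == 0 else (RoleType.SUPPORT if i == 1 else RoleType.MONITOR)
--     if task_type == "assembly" and n == 2:
--         return RoleType.ASSEMBLER if i == 0 else RoleType.SUPPORT
--     if task_type == "assembly" and n == 3:
--         return RoleType.LEADER if i == 0 else (RoleType.ASSEMBLER if i == 1 else RoleType.INSPECTOR)
--     return RoleType.LEADER if i == 0 else RoleType.FOLLOWER
--
-- def assign_multi_actor_roles(task_type, num_robots):
--     # there is always at least one slot (the leader), hence max(num_robots, 1)
--     return [_role_at(task_type, num_robots, i) for i in range(max(num_robots, 1))]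
-- ===== Notes on version B (the rewrite author's own statement) =====
-- stated objective: alternative
-- what changed: Instead of A's branch tree that returns whole hard-coded lists and builds the default with an append loop, B computes each robot's role from its position via a per-index role function and materialises the crew with one comprehension over range(max(num_robots,1)); the transport case for n=2 and n>=3 collapses into one positional rule (first=picker, last=placer, middle=transporter).
import Mathlib
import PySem

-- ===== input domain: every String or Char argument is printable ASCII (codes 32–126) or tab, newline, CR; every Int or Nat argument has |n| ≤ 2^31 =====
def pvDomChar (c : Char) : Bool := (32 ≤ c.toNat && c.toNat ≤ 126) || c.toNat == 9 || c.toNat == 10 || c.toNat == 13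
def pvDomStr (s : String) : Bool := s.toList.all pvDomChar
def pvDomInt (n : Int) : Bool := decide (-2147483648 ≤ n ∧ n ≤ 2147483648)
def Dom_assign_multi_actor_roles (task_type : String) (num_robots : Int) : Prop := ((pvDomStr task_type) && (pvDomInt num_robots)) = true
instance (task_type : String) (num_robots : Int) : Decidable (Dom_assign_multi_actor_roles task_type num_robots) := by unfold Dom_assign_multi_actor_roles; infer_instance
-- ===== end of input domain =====

-- B computes each robot's role from its position via a per-index role function and one
-- comprehension over range(max(num_robots,1)), instead of A's branch tree of hard-coded
-- lists plus an append loop (objective: alternative decomposition, same cost).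

-- ===== PORT A =====
-- Python list * int is replicate with negatives giving []: (k).toNat is that clamp.
def assign_multi_actor_roles (task_type : String) (num_robots : Int) : List String :=
  if task_type = "cooperative_lift" then
    if num_robots = 2 then ["leader", "follower"]
    else if num_robots = 3 then ["leader", "support", "monitor"]
    else
      (PySem.List.pyRange 0 (num_robots - 1) 1).foldl (fun roles _ => roles ++ ["follower"]) ["leader"]
  else if task_type = "assembly" then
    if num_robots = 2 then ["assembler", "support"]
    else if num_robots = 3 then ["leader", "assembler", "inspector"]
    else
      (PySem.List.pyRange 0 (num_robots - 1) 1).foldl (fun roles _ => roles ++ ["follower"]) ["leader"]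
  else if task_type = "transport" then
    if num_robots = 2 then ["picker", "placer"]
    else if num_robots ≥ 3 then
      ["picker"] ++ List.replicate (num_robots - 2).toNat "transporter" ++ ["placer"]
    else
      (PySem.List.pyRange 0 (num_robots - 1) 1).foldl (fun roles _ => roles ++ ["follower"]) ["leader"]
  else
    (PySem.List.pyRange 0 (num_robots - 1) 1).foldl (fun roles _ => roles ++ ["follower"]) ["leader"]

-- ===== PORT B =====
-- _role_at: role of the robot at position i in a crew of n for this task.
def pvRoleAt (task_type : String) (n : Int) (i : Int) : String :=
  if task_type = "transport" ∧ n ≥ 2 then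
    if i = 0 then "picker"
    else if i = n - 1 then "placer"
    else "transporter"
  else if task_type = "cooperative_lift" ∧ n = 3 then
    if i = 0 then "leader" else if i = 1 then "support" else "monitor"
  else if task_type = "assembly" ∧ n = 2 then
    if i = 0 then "assembler" else "support"
  else if task_type = "assembly" ∧ n = 3 then
    if i = 0 then "leader" else if i = 1 then "assembler" else "inspector"
  else
    if i = 0 then "leader" else "follower"

def assign_multi_actor_roles_alt (task_type : String) (num_robots : Int) : List String :=
  (PySem.List.pyRange 0 (max num_robots 1) 1).map (pvRoleAt task_type num_robots)

-- ===== PRECONDITION & SPEC =====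
def Spec_assign_multi_actor_roles (task_type : String) (num_robots : Int) (out : List String) : Prop := out = assign_multi_actor_roles_alt task_type num_robots
instance (task_type : String) (num_robots : Int) (out : List String) : Decidable (Spec_assign_multi_actor_roles task_type num_robots out) := by unfold Spec_assign_multi_actor_roles; infer_instance

-- ===== CLAIM (what is proved, stated in full; the proofs are below) =====
def Claim_equal_assign_multi_actor_roles : Prop := ∀ (task_type : String) (num_robots : Int), Dom_assign_multi_actor_roles task_type num_robots → Spec_assign_multi_actor_roles task_type num_robots (assign_multi_actor_roles task_type num_robots)

-- ===== LEMMAS AND PROOFS =====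
theorem foldl_append_follower (l : List Int) (init : List String) :
    l.foldl (fun roles _ => roles ++ ["follower"]) init
      = init ++ List.replicate l.length "follower" := by
  induction l generalizing init with
  | nil => simp
  | cons x xs ih =>
      simp [List.foldl, ih, List.replicate_succ, List.append_assoc]

theorem default_loop (n : Int) :
    (PySem.List.pyRange 0 (n - 1) 1).foldl (fun roles _ => roles ++ ["follower"]) ["leader"]
      = "leader" :: List.replicate (n - 1).toNat "follower" := by
  rw [foldl_append_follower, PySem.List.length_pyRange_one]
  norm_num

theorem map_pyRange_const (a b : Int) (f : Int → String) (c : String)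
    (h : ∀ i, a ≤ i → i < b → f i = c) :
    (PySem.List.pyRange a b 1).map f = List.replicate (b - a).toNat c := by
  have h1 : (PySem.List.pyRange a b 1).map f = (PySem.List.pyRange a b 1).map (fun _ => c) :=
    List.map_congr_left (by
      intro x hx
      rw [PySem.List.mem_pyRange_one] at hx
      exact h x hx.1 hx.2)
  rw [h1]
  simp [PySem.List.length_pyRange_one]

theorem alt_default (t : String) (n : Int)
    (h : ∀ i, pvRoleAt t n i = if i = 0 then "leader" else "follower") :
    assign_multi_actor_roles_alt t n = "leader" :: List.replicate (n - 1).toNat "follower" := by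
  unfold assign_multi_actor_roles_alt
  rw [PySem.List.pyRange_one_cons (by omega : (0:Int) < max n 1)]
  rw [List.map_cons, h 0, if_pos rfl]
  rw [show (0:Int) + 1 = 1 from by norm_num]
  rw [map_pyRange_const 1 (max n 1) _ "follower"
        (by intro i hi _; rw [h i, if_neg (by omega)])]
  rw [show (max n 1 - 1).toNat = (n - 1).toNat from by omega]

theorem alt_transport (n : Int) (h3 : n ≥ 3) :
    assign_multi_actor_roles_alt "transport" n
      = ["picker"] ++ List.replicate (n - 2).toNat "transporter" ++ ["placer"] := by
  unfold assign_multi_actor_roles_alt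
  have hmax : max n 1 = n := by omega
  rw [hmax]
  have hsplit : PySem.List.pyRange 0 n 1
      = (0 : Int) :: (PySem.List.pyRange 1 (n - 1) 1 ++ [n - 1]) := by
    have hstep := PySem.List.pyRange_one_succ_right (a := (0:Int)) (b := n - 1)
      (by omega : (0:Int) ≤ n - 1)
    rw [show n - 1 + 1 = n from by omega] at hstep
    rw [hstep, PySem.List.pyRange_one_cons (by omega : (0:Int) < n - 1),
        show (0:Int) + 1 = 1 from by norm_num, List.cons_append]
  rw [hsplit]
  simp only [List.map_cons, List.map_append, List.map_nil]
  rw [map_pyRange_const 1 (n - 1) _ "transporter"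
        (by
          intro i hi1 hi2
          unfold pvRoleAt
          rw [if_pos ⟨rfl, by omega⟩, if_neg (by omega), if_neg (by omega)])]
  unfold pvRoleAt
  rw [if_pos ⟨rfl, by omega⟩, if_pos rfl]
  rw [if_pos ⟨rfl, by omega⟩, if_neg (by omega), if_pos rfl]
  simp
  omega

-- ===== VERDICT (by name: the statement is the Claim_ definition above) =====
theorem assign_multi_actor_roles_spec : Claim_equal_assign_multi_actor_roles := by
  intro t n _
  show assign_multi_actor_roles t n = assign_multi_actor_roles_alt t n
  unfold assign_multi_actor_roles
  split_ifs with h1 h2 h3 h4 h5 h6 h7 h8 h9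
  · subst h1 h2; decide
  · subst h1 h3; decide
  · subst h1
    rw [default_loop, alt_default]
    intro i
    unfold pvRoleAt
    rw [if_neg (by rintro ⟨ht, -⟩; exact absurd ht (by decide)),
        if_neg (by rintro ⟨-, hn⟩; exact h3 hn),
        if_neg (by rintro ⟨ht, -⟩; exact absurd ht (by decide)),
        if_neg (by rintro ⟨ht, -⟩; exact absurd ht (by decide))]
  · subst h4 h5; decide
  · subst h4 h6; decide
  · subst h4
    rw [default_loop, alt_default]
    intro i
    unfold pvRoleAt
    rw [if_neg (by rintro ⟨ht, -⟩; exact absurd ht (by decide)),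
        if_neg (by rintro ⟨ht, -⟩; exact absurd ht (by decide)),
        if_neg (by rintro ⟨-, hn⟩; exact h5 hn),
        if_neg (by rintro ⟨-, hn⟩; exact h6 hn)]
  · subst h7 h8; decide
  · subst h7
    rw [alt_transport n h9]
  · subst h7
    rw [default_loop, alt_default]
    intro i
    unfold pvRoleAt
    rw [if_neg (by rintro ⟨-, hn⟩; omega),
        if_neg (by rintro ⟨ht, -⟩; exact absurd ht (by decide)),
        if_neg (by rintro ⟨ht, -⟩; exact absurd ht (by decide)),
        if_neg (by rintro ⟨ht, -⟩; exact absurd ht (by decide))]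
  · rw [default_loop, alt_default]
    intro i
    unfold pvRoleAt
    rw [if_neg (by rintro ⟨ht, -⟩; exact h7 ht),
        if_neg (by rintro ⟨ht, -⟩; exact h1 ht),
        if_neg (by rintro ⟨ht, -⟩; exact h4 ht),
        if_neg (by rintro ⟨ht, -⟩; exact h4 ht)]
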